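-- pv_equiv track=rewrite | github.com/boostcamp-codingstudy/coding-study | jiwon/August/prog_131127.py | solution
-- ===== SOURCE A (Python) =====
-- from collections import Counter
--
-- def solution(want, number, discount):
--     answer = 0
--
--     # 필요한 품목 리스트 => 딕셔너리
--     check_list = {w: n for w, n in zip(want, number)}
--
--     # 순서대로 10개씩 확인
--     for i in range(0, len(discount)-9):
--         dc_list = Counter(discount[i:i+10]).most_common()
--         calc_list = check_list.copy()
--
--         # 품목 리스트에서 원하는 품목이 있으면 뺌
--         for dl in dc_list:
--             if dl[0] in calc_list.keys():
--                 calc_list[dl[0]] -= dl[1]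
--
--         # 아직도 사야할 품목이 있으면 break, 없으면 answer += 1
--         for cl in calc_list.values():
--             if cl > 0:
--                 break
--         else:
--             answer += 1
--
--     return answer
-- ===== SOURCE B (Python) =====
-- def solution(want, number, discount):
--     need = {}
--     for w, n in zip(want, number):
--         need[w] = n
--     k = len(need)
--     cnt = {}
--     sat = 0
--     for w in need:
--         if 0 >= need[w]:
--             sat += 1
--     res = 0
--     for j, item in enumerate(discount):
--         if item in need:
--             c = cnt.get(item, 0) + 1
--             cnt[item] = c
--             sat += (1 if c >= need[item] else 0) - (1 if c - 1 >= need[item] else 0)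
--         if j >= 10:
--             out = discount[j - 10]
--             if out in need:
--                 c = cnt[out] - 1
--                 cnt[out] = c
--                 sat += (1 if c >= need[out] else 0) - (1 if c + 1 >= need[out] else 0)
--         if j >= 9 and sat == k:
--             res += 1
--     return res
-- ===== Notes on version B (the rewrite author's own statement) =====
-- stated objective: faster
-- what changed: Replaces A's per-window Counter + most_common sort + dict copy-and-subtract recount by a single sliding window pass that keeps per-item counts and a satisfied-items counter, updated incrementally as items enter and leave.
import Mathlib
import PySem

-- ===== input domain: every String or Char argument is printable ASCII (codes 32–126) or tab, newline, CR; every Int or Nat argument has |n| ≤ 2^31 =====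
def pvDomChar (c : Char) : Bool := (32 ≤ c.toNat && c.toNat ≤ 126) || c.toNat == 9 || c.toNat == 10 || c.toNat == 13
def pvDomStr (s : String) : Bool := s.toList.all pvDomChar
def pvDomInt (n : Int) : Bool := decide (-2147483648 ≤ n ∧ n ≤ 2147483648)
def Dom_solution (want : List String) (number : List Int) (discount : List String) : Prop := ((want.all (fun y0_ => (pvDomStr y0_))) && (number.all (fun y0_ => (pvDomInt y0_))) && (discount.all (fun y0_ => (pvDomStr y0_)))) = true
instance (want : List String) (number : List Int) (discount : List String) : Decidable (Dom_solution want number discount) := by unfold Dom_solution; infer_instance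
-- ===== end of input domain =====

-- B replaces A's per-window Counter/most_common/copy-and-subtract recount by a single sliding-window
-- pass keeping per-item counts and a satisfied-items counter, updated as items enter and leave.

-- ===== PORT A =====
def solution (want : List String) (number : List Int) (discount : List String) : Int :=
  let check_list : PySem.Dict String Int :=
    (want.zip number).foldl (fun d p => d.insert p.1 p.2) PySem.Dict.empty
  (PySem.List.pyRange 0 ((discount.length : Int) - 9) 1).foldl (fun answer i =>
    let dc_list :=
      PySem.List.sorted
        (PySem.Dict.counter (PySem.List.slice discount (some i) (some (i + 10)))).items
        (fun dl => dl.2) true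
    let calc_list := dc_list.foldl
      (fun d dl => if d.contains dl.1 then d.modify dl.1 0 (fun v => v - dl.2) else d) check_list
    if calc_list.values.all (fun cl => !decide (0 < cl)) then answer + 1 else answer) 0

-- ===== PORT B =====
def solution_alt (want : List String) (number : List Int) (discount : List String) : Int :=
  let need : PySem.Dict String Int :=
    (want.zip number).foldl (fun d p => d.insert p.1 p.2) PySem.Dict.empty
  let k : Int := (need.size : Int)
  let sat0 : Int := need.keys.foldl (fun s w => if 0 ≥ need.getD w 0 then s + 1 else s) 0
  let st := (PySem.List.enumerate discount 0).foldl
    (fun (st : PySem.Dict String Int × Int × Int) (ji : Int × String) =>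
      let st1 : PySem.Dict String Int × Int × Int :=
        if need.contains ji.2 then
          let c := st.1.getD ji.2 0 + 1
          (st.1.insert ji.2 c,
           st.2.1 + ((if c ≥ need.getD ji.2 0 then (1 : Int) else 0)
             - (if c - 1 ≥ need.getD ji.2 0 then (1 : Int) else 0)),
           st.2.2)
        else st
      let st2 : PySem.Dict String Int × Int × Int :=
        if ji.1 ≥ 10 then
          let out := PySem.List.pyGetD discount (ji.1 - 10) ""
          if need.contains out then
            let c := st1.1.getD out 0 - 1
            (st1.1.insert out c,
             st1.2.1 + ((if c ≥ need.getD out 0 then (1 : Int) else 0)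
               - (if c + 1 ≥ need.getD out 0 then (1 : Int) else 0)),
             st1.2.2)
          else st1
        else st1
      if ji.1 ≥ 9 ∧ st2.2.1 = k then (st2.1, st2.2.1, st2.2.2 + 1) else st2)
    ((PySem.Dict.empty : PySem.Dict String Int), sat0, (0 : Int))
  st.2.2

-- ===== PRECONDITION & SPEC =====
def Spec_solution (want : List String) (number : List Int) (discount : List String) (out : Int) : Prop := out = solution_alt want number discount
instance (want : List String) (number : List Int) (discount : List String) (out : Int) : Decidable (Spec_solution want number discount out) := by unfold Spec_solution; infer_instance

-- ===== CLAIM (what is proved, stated in full; the proofs are below) =====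
def Claim_equal_solution : Prop := ∀ (want : List String) (number : List Int) (discount : List String), Dom_solution want number discount → Spec_solution want number discount (solution want number discount)

-- ===== LEMMAS AND PROOFS =====

-- A's subtraction loop: key not present among the pairs → value untouched
theorem subLoop_notmem (ps : List (String × Int)) (d : PySem.Dict String Int) (w : String)
    (h : ∀ p ∈ ps, p.1 ≠ w) :
    (ps.foldl (fun d dl => if d.contains dl.1 then d.modify dl.1 0 (fun v => v - dl.2) else d)
      d).getD w 0 = d.getD w 0 := by
  induction ps generalizing d with
  | nil => rfl
  | cons p t ih =>
    simp only [List.foldl_cons]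
    rw [ih _ (fun q hq => h q (List.mem_cons_of_mem _ hq))]
    split
    · exact PySem.Dict.getD_modify_of_ne d 0 _ (Ne.symm (h p (List.mem_cons_self)))
    · rfl

-- A's subtraction loop never changes which keys are present
theorem subLoop_contains (ps : List (String × Int)) (d : PySem.Dict String Int) (w : String) :
    (ps.foldl (fun d dl => if d.contains dl.1 then d.modify dl.1 0 (fun v => v - dl.2) else d)
      d).contains w = d.contains w := by
  induction ps generalizing d with
  | nil => rfl
  | cons p t ih =>
    simp only [List.foldl_cons]
    rw [ih]
    split
    · next hc =>
      rw [PySem.Dict.contains_modify]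
      rcases h : (w == p.1) with _ | _
      · simp
      · simp only [Bool.true_or]
        rw [eq_of_beq h] at *
        exact hc.symm
    · rfl

-- A's subtraction loop keeps the keys Nodup
theorem subLoop_nodup (ps : List (String × Int)) (d : PySem.Dict String Int)
    (h : d.keys.Nodup) :
    (ps.foldl (fun d dl => if d.contains dl.1 then d.modify dl.1 0 (fun v => v - dl.2) else d)
      d).keys.Nodup := by
  induction ps generalizing d with
  | nil => exact h
  | cons p t ih =>
    simp only [List.foldl_cons]
    apply ih
    split
    · rw [PySem.Dict.keys_modify]
      exact PySem.Dict.nodup_keys_insert _ _ _ h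
    · exact h

-- A's subtraction loop on pairs with distinct keys: a present pair is subtracted exactly once
theorem subLoop_mem (ps : List (String × Int)) (d : PySem.Dict String Int) (w : String) (c : Int)
    (hmem : (w, c) ∈ ps) (hnd : (ps.map Prod.fst).Nodup) :
    (ps.foldl (fun d dl => if d.contains dl.1 then d.modify dl.1 0 (fun v => v - dl.2) else d)
      d).getD w 0 = if d.contains w then d.getD w 0 - c else d.getD w 0 := by
  induction ps generalizing d with
  | nil => cases hmem
  | cons p t ih =>
    simp only [List.map_cons, List.nodup_cons] at hnd
    rcases List.mem_cons.mp hmem with h0 | hmemt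
    · -- the head is (w, c); w does not occur among the tail's keys
      subst h0
      simp only [List.foldl_cons]
      have hnot : ∀ q ∈ t, q.1 ≠ w := by
        intro q hq hqe
        have hm : q.1 ∈ t.map Prod.fst := List.mem_map_of_mem hq
        rw [hqe] at hm
        exact hnd.1 hm
      split
      · rw [subLoop_notmem t _ _ hnot, PySem.Dict.getD_modify_self]
      · exact subLoop_notmem t _ _ hnot
    · -- (w, c) is in the tail; the head's key differs from w
      have hne : p.1 ≠ w := by
        intro hqe
        have hm : w ∈ t.map Prod.fst := List.mem_map_of_mem (f := Prod.fst) hmemt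
        rw [← hqe] at hm
        exact hnd.1 hm
      simp only [List.foldl_cons]
      rw [ih _ hmemt hnd.2]
      split
      · next hc =>
        rw [PySem.Dict.getD_modify_of_ne _ 0 _ (Ne.symm hne)]
        rw [PySem.Dict.contains_modify]
        have : (w == p.1) = false := by
          rcases hb : (w == p.1) with _ | _
          · rfl
          · exact absurd (eq_of_beq hb).symm hne
        rw [this, Bool.false_or]
      · rfl

-- the per-window decisions of A and B coincide
theorem cond_eq (D : PySem.Dict String Int) (hnd : D.keys.Nodup) (discount : List String)
    (n : Nat) :
    (((PySem.List.sorted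
        (PySem.Dict.counter ((discount.drop n).take 10)).items (fun dl => dl.2) true).foldl
      (fun d dl => if d.contains dl.1 then d.modify dl.1 0 (fun v => v - dl.2) else d)
      D).values.all (fun cl => !decide (0 < cl)))
    = D.keys.all (fun w =>
        decide (((((discount.drop n).take 10).count w : Int)) ≥ D.getD w 0)) := by
  set win := (discount.drop n).take 10 with hwin
  set ps := PySem.List.sorted (PySem.Dict.counter win).items (fun dl => dl.2) true with hpsdef
  set calcd := ps.foldl
    (fun d dl => if d.contains dl.1 then d.modify dl.1 0 (fun v => v - dl.2) else d) D with hcalc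
  have hps : ps.Perm ((PySem.Set.ofList win).map (fun k => (k, (win.count k : Int)))) := by
    rw [← PySem.Dict.items_counter]
    exact PySem.List.sorted_perm _ _ _
  have hfst : (ps.map Prod.fst).Perm (PySem.Set.ofList win) := by
    have h := hps.map Prod.fst
    rw [List.map_map] at h
    have he : (Prod.fst ∘ fun k : String => (k, (win.count k : Int))) = id := by
      funext k; rfl
    rw [he, List.map_id] at h
    exact h
  have hndps : (ps.map Prod.fst).Nodup := hfst.nodup_iff.mpr (PySem.Set.nodup_ofList win)
  have hkeyps : ∀ w : String, w ∈ ps.map Prod.fst ↔ w ∈ win := by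
    intro w
    rw [hfst.mem_iff, PySem.Set.mem_ofList]
  have hmemps : ∀ w ∈ win, (w, (win.count w : Int)) ∈ ps := by
    intro w hw
    rw [hps.mem_iff]
    exact List.mem_map_of_mem ((PySem.Set.mem_ofList win w).mpr hw)
  have hmemkeys : ∀ w : String, w ∈ calcd.keys ↔ w ∈ D.keys := by
    intro w
    rw [← PySem.Dict.contains_iff_mem_keys, hcalc, subLoop_contains,
      PySem.Dict.contains_iff_mem_keys]
  have hval : ∀ w ∈ D.keys, calcd.getD w 0 = D.getD w 0 - (win.count w : Int) := by
    intro w hwD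
    by_cases hw : w ∈ win
    · rw [hcalc, subLoop_mem ps D w _ (hmemps w hw) hndps,
        if_pos ((PySem.Dict.contains_iff_mem_keys D w).mpr hwD)]
    · have hnotin : ∀ p ∈ ps, p.1 ≠ w := by
        intro p hp he
        have hm : p.1 ∈ win := (hkeyps p.1).mp (List.mem_map_of_mem hp)
        rw [he] at hm
        exact hw hm
      rw [hcalc, subLoop_notmem ps D w hnotin, List.count_eq_zero_of_not_mem hw]
      simp
  rw [PySem.Dict.values_eq_map_keys _ (subLoop_nodup ps D hnd) 0]
  rw [Bool.eq_iff_iff, List.all_eq_true, List.all_eq_true]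
  simp only [List.forall_mem_map]
  constructor
  · intro h w hwD
    have hx := h w ((hmemkeys w).mpr hwD)
    rw [hval w hwD] at hx
    simp only [Bool.not_eq_true', decide_eq_false_iff_not, not_lt] at hx
    simp only [decide_eq_true_iff, ge_iff_le]
    omega
  · intro h w hwk
    have hwD := (hmemkeys w).mp hwk
    have hx := h w hwD
    rw [hval w hwD]
    simp only [decide_eq_true_iff, ge_iff_le] at hx
    simp only [Bool.not_eq_true', decide_eq_false_iff_not, not_lt]
    omega

-- ===== B-side machinery =====

-- the step function of B's sliding-window loop (identical to the lambda in solution_alt)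
def stepB (need : PySem.Dict String Int) (discount : List String) (k : Int)
    (st : PySem.Dict String Int × Int × Int) (ji : Int × String) :
    PySem.Dict String Int × Int × Int :=
  let st1 :=
    if need.contains ji.2 then
      let c := st.1.getD ji.2 0 + 1
      (st.1.insert ji.2 c,
       st.2.1 + ((if c ≥ need.getD ji.2 0 then (1 : Int) else 0)
         - (if c - 1 ≥ need.getD ji.2 0 then (1 : Int) else 0)),
       st.2.2)
    else st
  let st2 :=
    if ji.1 ≥ 10 then
      let out := PySem.List.pyGetD discount (ji.1 - 10) ""
      if need.contains out then
        let c := st1.1.getD out 0 - 1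
        (st1.1.insert out c,
         st1.2.1 + ((if c ≥ need.getD out 0 then (1 : Int) else 0)
           - (if c + 1 ≥ need.getD out 0 then (1 : Int) else 0)),
         st1.2.2)
      else st1
    else st1
  if ji.1 ≥ 9 ∧ st2.2.1 = k then (st2.1, st2.2.1, st2.2.2 + 1) else st2

-- per-key window condition, number of satisfied keys, number of good windows
def winCondB (D : PySem.Dict String Int) (win : List String) : String → Bool :=
  fun w => decide ((win.count w : Int) ≥ D.getD w 0)

def satOfD (D : PySem.Dict String Int) (win : List String) : Int :=
  ((D.keys.filter (winCondB D win)).length : Int)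

def resOfD (D : PySem.Dict String Int) (l : List String) : Int :=
  (((List.range (l.length - 9)).filter
    (fun n => D.keys.all (winCondB D ((l.drop n).take 10)))).length : Int)

theorem solution_alt_eq (want : List String) (number : List Int) (discount : List String) :
    solution_alt want number discount =
      ((PySem.List.enumerate discount 0).foldl
        (stepB ((want.zip number).foldl (fun d p => d.insert p.1 p.2) PySem.Dict.empty) discount
          ((((want.zip number).foldl (fun d p => d.insert p.1 p.2) PySem.Dict.empty).size : Int)))
        ((PySem.Dict.empty : PySem.Dict String Int),
         ((want.zip number).foldl (fun d p => d.insert p.1 p.2) PySem.Dict.empty).keys.foldl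
           (fun s w => if 0 ≥ ((want.zip number).foldl (fun d p => d.insert p.1 p.2) PySem.Dict.empty).getD w 0
             then s + 1 else s) 0,
         (0 : Int))).2.2 := rfl

-- counting loops are filter lengths
theorem foldl_count {α : Type} (p : α → Prop) [DecidablePred p] (l : List α) (s : Int) :
    l.foldl (fun a x => if p x then a + 1 else a) s
      = s + ((l.filter (fun x => decide (p x))).length : Int) := by
  induction l generalizing s with
  | nil => simp
  | cons a t ih =>
    simp only [List.foldl_cons, List.filter_cons]
    by_cases h : p a
    · rw [if_pos h, ih]
      simp [h]
      ring
    · rw [if_neg h, ih]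
      simp [h]

theorem foldl_count_bool {α : Type} (p : α → Bool) (l : List α) (s : Int) :
    l.foldl (fun a x => if p x then a + 1 else a) s
      = s + ((l.filter p).length : Int) := by
  induction l generalizing s with
  | nil => simp
  | cons a t ih =>
    simp only [List.foldl_cons, List.filter_cons]
    rcases h : p a with _ | _
    · simp only [Bool.false_eq_true, if_false]
      rw [ih]
    · simp only [if_true]
      rw [ih]
      simp only [List.length_cons]
      push_cast
      ring

-- pyRange from 0 with step 1 is a mapped List.range
theorem pyRange_zero_cast (b : Int) :
    PySem.List.pyRange 0 b 1 = List.map (fun (n : Nat) => (n : Int)) (List.range b.toNat) := by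
  simp only [PySem.List.pyRange]
  rw [show (if (0:Int) < 1 then if 0 < b then ((b - 0 + 1 - 1) / 1).toNat else 0
      else if b < 0 then ((0 - b + -1 - 1) / -1).toNat else 0) = b.toNat from by
    simp only [if_pos (by norm_num : (0:Int) < 1)]
    split <;> omega]
  simp only [mul_comm]
  simp

-- updating one key: how the satisfied-filter length moves
theorem filter_len_update (ks : List String) (hnd : ks.Nodup) (p q : String → Bool) (x : String)
    (h : ∀ w ∈ ks, w ≠ x → q w = p w) :
    ((ks.filter q).length : Int) = ((ks.filter p).length : Int)
      + (if x ∈ ks then (if q x then (1 : Int) else 0) - (if p x then (1 : Int) else 0) else 0) := by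
  induction ks with
  | nil => simp
  | cons a t ih =>
    simp only [List.nodup_cons] at hnd
    by_cases hax : a = x
    · subst hax
      have ht : t.filter q = t.filter p :=
        List.filter_congr (fun w hw => h w (List.mem_cons_of_mem _ hw)
          (fun he => hnd.1 (he ▸ hw)))
      simp only [List.filter_cons, List.mem_cons, true_or, if_pos]
      rcases hq : q a with _ | _ <;> rcases hp : p a with _ | _ <;> simp [ht]
    · have ha := h a List.mem_cons_self hax
      have ihh := ih hnd.2 (fun w hw hwx => h w (List.mem_cons_of_mem _ hw) hwx)
      have hmem2 : (x ∈ a :: t) = (x ∈ t) := propext (by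
        simp only [List.mem_cons]
        constructor
        · rintro (he | hm)
          · exact absurd he.symm hax
          · exact hm
        · exact Or.inr)
      simp only [hmem2]
      rcases hp : p a with _ | _ <;> rw [hp] at ha <;>
        simp only [List.filter_cons, ha, hp, Bool.false_eq_true, if_false, if_true,
          List.length_cons] <;>
        split_ifs at ihh ⊢ <;> push_cast at ihh ⊢ <;> omega

theorem size_eq_keys_length (d : PySem.Dict String Int) : d.size = d.keys.length := by
  simp [PySem.Dict.size, PySem.Dict.keys]

-- sat equals the key count exactly when every key is satisfied
theorem satOfD_eq_size_iff (D : PySem.Dict String Int) (win : List String) :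
    (satOfD D win = (D.size : Int)) ↔ (D.keys.all (winCondB D win) = true) := by
  unfold satOfD
  rw [size_eq_keys_length, Int.natCast_inj, List.length_filter_eq_length_iff, List.all_eq_true]

-- appending an element adds (at most) the window ending at it
theorem resOfD_append (D : PySem.Dict String Int) (l : List String) (x : String) :
    resOfD D (l ++ [x]) = resOfD D l
      + (if 9 ≤ l.length ∧ D.keys.all (winCondB D ((l ++ [x]).drop ((l ++ [x]).length - 10))) = true
          then (1 : Int) else 0) := by
  unfold resOfD
  by_cases h9 : 9 ≤ l.length
  · have hlen : (l ++ [x]).length - 9 = (l.length - 9) + 1 := by simp; omega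
    rw [hlen, List.range_succ, List.filter_append]
    have hcong : (List.range (l.length - 9)).filter
          (fun n => D.keys.all (winCondB D (((l ++ [x]).drop n).take 10)))
        = (List.range (l.length - 9)).filter
          (fun n => D.keys.all (winCondB D ((l.drop n).take 10))) := by
      apply List.filter_congr
      intro n hn
      simp only [List.mem_range] at hn
      have hwineq : ((l ++ [x]).drop n).take 10 = (l.drop n).take 10 := by
        rw [List.drop_append_of_le_length (by omega), List.take_append_of_le_length (by
          rw [List.length_drop]; omega)]
      rw [hwineq]
    rw [hcong]
    have hwin2 : ((l ++ [x]).drop (l.length - 9)).take 10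
        = (l ++ [x]).drop ((l ++ [x]).length - 10) := by
      have he : (l ++ [x]).length - 10 = l.length - 9 := by simp
      rw [he]
      exact List.take_of_length_le (by rw [List.length_drop]; simp; omega)
    simp only [List.filter_cons, List.filter_nil, hwin2]
    rcases hc : D.keys.all (winCondB D ((l ++ [x]).drop ((l ++ [x]).length - 10))) with _ | _
    · simp [h9]
    · simp [h9]
  · have h1 : (l ++ [x]).length - 9 = 0 := by simp; omega
    have h2 : l.length - 9 = 0 := by omega
    rw [h1, h2]
    simp [h9]

-- B's step does not look at the appended element's successors
theorem stepB_ext (D : PySem.Dict String Int) (k : Int) (L1 L2 : List String)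
    (st : PySem.Dict String Int × Int × Int) (ji : Int × String)
    (h : PySem.List.pyGetD L1 (ji.1 - 10) "" = PySem.List.pyGetD L2 (ji.1 - 10) "") :
    stepB D L1 k st ji = stepB D L2 k st ji := by
  simp only [stepB, h]

theorem stepB_congr (D : PySem.Dict String Int) (k : Int) (l : List String) (x : String)
    (st : PySem.Dict String Int × Int × Int) (ji : Int × String)
    (hj : ji ∈ PySem.List.enumerate l 0) :
    stepB D (l ++ [x]) k st ji = stepB D l k st ji := by
  rw [PySem.List.enumerate_eq_map_pyRange l ""] at hj
  rcases List.mem_map.mp hj with ⟨j, hjr, rfl⟩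
  have hjb : 0 ≤ j ∧ j < (l.length : Int) := by
    simp [PySem.List.pyRange, PySem.List.len] at hjr
    split at hjr <;> omega
  by_cases hj10 : (j, PySem.List.pyGetD l j "").1 ≥ 10
  · apply stepB_ext
    simp only at hj10 ⊢
    obtain ⟨n, rfl⟩ : ∃ n : Nat, j = (n : Int) := ⟨j.toNat, (Int.toNat_of_nonneg hjb.1).symm⟩
    rw [show (n : Int) - 10 = (((n - 10 : Nat) : Int)) from by omega]
    rw [PySem.List.pyGetD_natCast, PySem.List.pyGetD_natCast]
    exact List.getD_append _ _ _ _ (by simp at hjb; omega)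
  · dsimp only [stepB]
    rw [if_neg hj10, if_neg hj10]

-- window arithmetic
theorem win_small (l : List String) (x : String) (h : l.length ≤ 9) :
    (l ++ [x]).drop ((l ++ [x]).length - 10) = l.drop (l.length - 10) ++ [x] := by
  rw [show (l ++ [x]).length - 10 = 0 from by simp; omega, show l.length - 10 = 0 from by omega]
  simp

theorem win_big1 (l : List String) (h : 10 ≤ l.length) :
    l.drop (l.length - 10) = l.getD (l.length - 10) "" :: l.drop (l.length - 9) := by
  rw [List.getD_eq_getElem _ _ (by omega), List.drop_eq_getElem_cons (by omega : l.length - 10 < l.length)]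
  rw [show l.length - 10 + 1 = l.length - 9 from by omega]

theorem win_big2 (l : List String) (x : String) (h : 10 ≤ l.length) :
    (l ++ [x]).drop ((l ++ [x]).length - 10) = l.drop (l.length - 9) ++ [x] := by
  rw [show (l ++ [x]).length - 10 = l.length - 9 from by simp, List.drop_append_of_le_length (by omega)]

-- a wanted item enters the window
theorem upd_add (D : PySem.Dict String Int) (hnd : D.keys.Nodup) (win : List String)
    (cnt : PySem.Dict String Int) (sat : Int) (x : String)
    (hcnt : ∀ w ∈ D.keys, cnt.getD w 0 = (win.count w : Int))
    (hsat : sat = satOfD D win)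
    (hx : D.contains x = true) :
    (∀ w ∈ D.keys, (cnt.insert x (cnt.getD x 0 + 1)).getD w 0 = ((win ++ [x]).count w : Int))
    ∧ sat + ((if cnt.getD x 0 + 1 ≥ D.getD x 0 then (1 : Int) else 0)
        - (if cnt.getD x 0 + 1 - 1 ≥ D.getD x 0 then (1 : Int) else 0))
      = satOfD D (win ++ [x]) := by
  have hxk : x ∈ D.keys := (PySem.Dict.contains_iff_mem_keys D x).mp hx
  have hcx : ((win ++ [x]).count x : Int) = (win.count x : Int) + 1 := by
    rw [List.count_append, List.count_cons, List.count_nil]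
    simp
  have hcne : ∀ w : String, w ≠ x → (win ++ [x]).count w = win.count w := by
    intro w hw
    rw [List.count_append, List.count_cons, List.count_nil]
    simp
    intro he
    exact absurd he.symm hw
  refine ⟨?_, ?_⟩
  · intro w hw
    by_cases hwx : w = x
    · subst hwx
      rw [PySem.Dict.getD_insert_self, hcnt w hw, hcx]
    · rw [PySem.Dict.getD_insert_of_ne _ _ _ hwx, hcnt w hw, hcne w hwx]
  · rw [hsat]
    unfold satOfD
    rw [filter_len_update D.keys hnd (winCondB D win) (winCondB D (win ++ [x])) x
      (fun w _ hwx => by unfold winCondB; rw [hcne w hwx]), if_pos hxk]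
    rw [hcnt x hxk]
    unfold winCondB
    simp only [decide_eq_true_eq, hcx, ge_iff_le]
    split_ifs <;> push_cast <;> omega

-- a wanted item leaves the window
theorem upd_sub (D : PySem.Dict String Int) (hnd : D.keys.Nodup) (nw : List String)
    (cnt : PySem.Dict String Int) (sat : Int) (y : String)
    (hcnt : ∀ w ∈ D.keys, cnt.getD w 0 = (((y :: nw).count w : Nat) : Int))
    (hsat : sat = satOfD D (y :: nw))
    (hy : D.contains y = true) :
    (∀ w ∈ D.keys, (cnt.insert y (cnt.getD y 0 - 1)).getD w 0 = ((nw.count w : Nat) : Int))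
    ∧ sat + ((if cnt.getD y 0 - 1 ≥ D.getD y 0 then (1 : Int) else 0)
        - (if cnt.getD y 0 - 1 + 1 ≥ D.getD y 0 then (1 : Int) else 0))
      = satOfD D nw := by
  have hyk : y ∈ D.keys := (PySem.Dict.contains_iff_mem_keys D y).mp hy
  have hcy : (((y :: nw).count y : Nat) : Int) = (nw.count y : Int) + 1 := by
    rw [List.count_cons]
    simp
  have hcne : ∀ w : String, w ≠ y → (y :: nw).count w = nw.count w := by
    intro w hw
    rw [List.count_cons]
    simp
    intro he
    exact absurd he.symm hw
  refine ⟨?_, ?_⟩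
  · intro w hw
    by_cases hwy : w = y
    · subst hwy
      rw [PySem.Dict.getD_insert_self, hcnt w hw, hcy]
      ring
    · rw [PySem.Dict.getD_insert_of_ne _ _ _ hwy, hcnt w hw, hcne w hwy]
  · rw [hsat]
    unfold satOfD
    rw [filter_len_update D.keys hnd (winCondB D (y :: nw)) (winCondB D nw) y
      (fun w _ hwy => by unfold winCondB; rw [hcne w hwy]), if_pos hyk]
    rw [hcnt y hyk]
    unfold winCondB
    simp only [decide_eq_true_eq, hcy, ge_iff_le]
    split_ifs <;> push_cast <;> omega

-- an unwanted item enters / leaves: nothing changes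
theorem skip_add (D : PySem.Dict String Int) (win : List String) (x : String)
    (hx : D.contains x = false) :
    (∀ w ∈ D.keys, (((win ++ [x]).count w : Nat) : Int) = ((win.count w : Nat) : Int))
    ∧ satOfD D (win ++ [x]) = satOfD D win := by
  have hne : ∀ w ∈ D.keys, w ≠ x := by
    intro w hw he
    rw [he] at hw
    rw [(PySem.Dict.contains_iff_mem_keys D x).mpr hw] at hx
    cases hx
  have hcne : ∀ w ∈ D.keys, (win ++ [x]).count w = win.count w := by
    intro w hw
    rw [List.count_append, List.count_cons, List.count_nil]
    simp
    intro he
    exact absurd he.symm (hne w hw)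
  refine ⟨fun w hw => by rw [hcne w hw], ?_⟩
  unfold satOfD
  have hf : D.keys.filter (winCondB D (win ++ [x])) = D.keys.filter (winCondB D win) :=
    List.filter_congr (fun w hw => by unfold winCondB; rw [hcne w hw])
  rw [hf]

theorem skip_sub (D : PySem.Dict String Int) (nw : List String) (y : String)
    (hy : D.contains y = false) :
    (∀ w ∈ D.keys, ((nw.count w : Nat) : Int) = (((y :: nw).count w : Nat) : Int))
    ∧ satOfD D nw = satOfD D (y :: nw) := by
  have hne : ∀ w ∈ D.keys, w ≠ y := by
    intro w hw he
    rw [he] at hw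
    rw [(PySem.Dict.contains_iff_mem_keys D y).mpr hw] at hy
    cases hy
  have hcne : ∀ w ∈ D.keys, (y :: nw).count w = nw.count w := by
    intro w hw
    rw [List.count_cons]
    simp
    intro he
    exact absurd he.symm (hne w hw)
  refine ⟨fun w hw => by rw [hcne w hw], ?_⟩
  unfold satOfD
  have hf : D.keys.filter (winCondB D nw) = D.keys.filter (winCondB D (y :: nw)) :=
    List.filter_congr (fun w hw => by unfold winCondB; rw [hcne w hw])
  rw [hf]

-- the final res update of a step
theorem stepB_finish (D : PySem.Dict String Int) (l : List String) (x : String)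
    (cnt2 : PySem.Dict String Int) (sat2 res : Int)
    (h2cnt : ∀ w ∈ D.keys, cnt2.getD w 0 = (((l ++ [x]).drop ((l ++ [x]).length - 10)).count w : Int))
    (h2sat : sat2 = satOfD D ((l ++ [x]).drop ((l ++ [x]).length - 10)))
    (hres : res = resOfD D l) :
    (∀ w ∈ D.keys,
      (if (l.length : Int) ≥ 9 ∧ sat2 = (D.size : Int) then (cnt2, sat2, res + 1)
        else (cnt2, sat2, res)).1.getD w 0
        = (((l ++ [x]).drop ((l ++ [x]).length - 10)).count w : Int))
    ∧ (if (l.length : Int) ≥ 9 ∧ sat2 = (D.size : Int) then (cnt2, sat2, res + 1)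
        else (cnt2, sat2, res)).2.1
        = satOfD D ((l ++ [x]).drop ((l ++ [x]).length - 10))
    ∧ (if (l.length : Int) ≥ 9 ∧ sat2 = (D.size : Int) then (cnt2, sat2, res + 1)
        else (cnt2, sat2, res)).2.2
        = resOfD D (l ++ [x]) := by
  refine ⟨fun w hw => by split <;> exact h2cnt w hw, by split <;> exact h2sat, ?_⟩
  rw [resOfD_append, ← hres]
  by_cases hc : 9 ≤ l.length ∧ D.keys.all (winCondB D ((l ++ [x]).drop ((l ++ [x]).length - 10))) = true
  · rw [if_pos hc, if_pos ⟨by exact_mod_cast hc.1,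
      by rw [h2sat]; exact (satOfD_eq_size_iff D _).mpr hc.2⟩]
  · rw [if_neg hc, if_neg (fun hcc => hc ⟨by exact_mod_cast hcc.1,
      (satOfD_eq_size_iff D _).mp (h2sat ▸ hcc.2)⟩)]
    ring

-- one step of B's loop preserves the window/sat/res invariant
theorem stepB_step (D : PySem.Dict String Int) (hnd : D.keys.Nodup) (l : List String) (x : String)
    (cnt : PySem.Dict String Int) (sat res : Int)
    (hcnt : ∀ w ∈ D.keys, cnt.getD w 0 = ((l.drop (l.length - 10)).count w : Int))
    (hsat : sat = satOfD D (l.drop (l.length - 10)))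
    (hres : res = resOfD D l) :
    (∀ w ∈ D.keys,
        (stepB D (l ++ [x]) (D.size : Int) (cnt, sat, res) ((l.length : Int), x)).1.getD w 0
          = (((l ++ [x]).drop ((l ++ [x]).length - 10)).count w : Int))
      ∧ (stepB D (l ++ [x]) (D.size : Int) (cnt, sat, res) ((l.length : Int), x)).2.1
          = satOfD D ((l ++ [x]).drop ((l ++ [x]).length - 10))
      ∧ (stepB D (l ++ [x]) (D.size : Int) (cnt, sat, res) ((l.length : Int), x)).2.2
          = resOfD D (l ++ [x]) := by
  dsimp only [stepB]
  by_cases hm : (l.length : Int) ≥ 10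
  · -- a full window: one item enters, one leaves
    rw [if_pos hm]
    have hm' : 10 ≤ l.length := by exact_mod_cast hm
    have hout : PySem.List.pyGetD (l ++ [x]) ((l.length : Int) - 10) "" = l.getD (l.length - 10) "" := by
      rw [show ((l.length : Int) - 10) = (((l.length - 10 : Nat) : Int)) from by omega,
        PySem.List.pyGetD_natCast]
      exact List.getD_append _ _ _ _ (by omega)
    rw [hout]
    have hiw : l.drop (l.length - 10) ++ [x]
        = l.getD (l.length - 10) "" :: ((l ++ [x]).drop ((l ++ [x]).length - 10)) := by
      rw [win_big1 l hm', win_big2 l x hm', List.cons_append]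
    by_cases hx : D.contains x
    · rw [if_pos hx]
      obtain ⟨h1cnt, h1sat⟩ := upd_add D hnd (l.drop (l.length - 10)) cnt sat x hcnt hsat hx
      rw [hiw] at h1cnt h1sat
      by_cases hy : D.contains (l.getD (l.length - 10) "")
      · rw [if_pos hy]
        obtain ⟨h2cnt, h2sat⟩ := upd_sub D hnd ((l ++ [x]).drop ((l ++ [x]).length - 10))
          _ _ (l.getD (l.length - 10) "") h1cnt h1sat hy
        exact stepB_finish D l x _ _ _ h2cnt h2sat hres
      · rw [if_neg hy]
        obtain ⟨hsk, hss⟩ := skip_sub D ((l ++ [x]).drop ((l ++ [x]).length - 10))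
          (l.getD (l.length - 10) "") (by simpa using hy)
        exact stepB_finish D l x _ _ _
          (fun w hw => by rw [h1cnt w hw, ← hsk w hw]) (by rw [h1sat, ← hss]) hres
    · rw [if_neg hx]
      obtain ⟨hsk, hss⟩ := skip_add D (l.drop (l.length - 10)) x (by simpa using hx)
      have h1cnt : ∀ w ∈ D.keys, cnt.getD w 0
          = (((l.getD (l.length - 10) "" :: ((l ++ [x]).drop ((l ++ [x]).length - 10))).count w : Nat) : Int) := by
        intro w hw
        rw [hcnt w hw, ← hsk w hw, hiw]
      have h1sat : sat = satOfD D (l.getD (l.length - 10) "" :: ((l ++ [x]).drop ((l ++ [x]).length - 10))) := by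
        rw [hsat, ← hss, hiw]
      by_cases hy : D.contains (l.getD (l.length - 10) "")
      · rw [if_pos hy]
        obtain ⟨h2cnt, h2sat⟩ := upd_sub D hnd ((l ++ [x]).drop ((l ++ [x]).length - 10))
          _ _ (l.getD (l.length - 10) "") h1cnt h1sat hy
        exact stepB_finish D l x _ _ _ h2cnt h2sat hres
      · rw [if_neg hy]
        obtain ⟨hsk2, hss2⟩ := skip_sub D ((l ++ [x]).drop ((l ++ [x]).length - 10))
          (l.getD (l.length - 10) "") (by simpa using hy)
        exact stepB_finish D l x _ _ _
          (fun w hw => by rw [h1cnt w hw, ← hsk2 w hw]) (by rw [h1sat, ← hss2]) hres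
  · -- the window only grows
    rw [if_neg hm]
    have hm' : l.length ≤ 9 := by omega
    have hiw : (l ++ [x]).drop ((l ++ [x]).length - 10) = l.drop (l.length - 10) ++ [x] :=
      win_small l x hm'
    by_cases hx : D.contains x
    · rw [if_pos hx]
      obtain ⟨h1cnt, h1sat⟩ := upd_add D hnd (l.drop (l.length - 10)) cnt sat x hcnt hsat hx
      exact stepB_finish D l x _ _ _
        (fun w hw => by rw [hiw]; exact h1cnt w hw) (by rw [hiw]; exact h1sat) hres
    · rw [if_neg hx]
      obtain ⟨hsk, hss⟩ := skip_add D (l.drop (l.length - 10)) x (by simpa using hx)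
      exact stepB_finish D l x _ _ _
        (fun w hw => by rw [hiw, hsk w hw]; exact hcnt w hw) (by rw [hiw, hss]; exact hsat) hres

-- the full loop invariant
theorem invB (D : PySem.Dict String Int) (hnd : D.keys.Nodup) (l : List String) :
    (∀ w ∈ D.keys,
        ((PySem.List.enumerate l 0).foldl (stepB D l (D.size : Int))
          (PySem.Dict.empty, satOfD D [], 0)).1.getD w 0
          = ((l.drop (l.length - 10)).count w : Int))
      ∧ ((PySem.List.enumerate l 0).foldl (stepB D l (D.size : Int))
          (PySem.Dict.empty, satOfD D [], 0)).2.1 = satOfD D (l.drop (l.length - 10))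
      ∧ ((PySem.List.enumerate l 0).foldl (stepB D l (D.size : Int))
          (PySem.Dict.empty, satOfD D [], 0)).2.2 = resOfD D l := by
  induction l using List.reverseRecOn with
  | nil =>
    refine ⟨fun w _ => by simp [PySem.Dict.getD_empty], rfl, ?_⟩
    unfold resOfD
    simp
  | append_singleton l x ih =>
    rw [PySem.List.enumerate_append, List.foldl_append]
    have hswap : (PySem.List.enumerate l 0).foldl (stepB D (l ++ [x]) (D.size : Int))
          (PySem.Dict.empty, satOfD D [], 0)
        = (PySem.List.enumerate l 0).foldl (stepB D l (D.size : Int))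
          (PySem.Dict.empty, satOfD D [], 0) :=
      PySem.List.foldl_congr_mem _ _ _ _ (fun acc ji hji => stepB_congr D _ l x acc ji hji)
    rw [hswap]
    have hsing : PySem.List.enumerate [x] (0 + (l.length : Int)) = [((l.length : Int), x)] := by
      simp [PySem.List.enumerate]
    rw [hsing, List.foldl_cons, List.foldl_nil]
    exact stepB_step D hnd l x _ _ _ ih.1 ih.2.1 ih.2.2

-- ===== VERDICT (by name: the statement is the Claim_ definition above) =====
theorem solution_spec : Claim_equal_solution := by
  intro want number discount _
  unfold Spec_solution solution
  rw [solution_alt_eq]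
  set D := (want.zip number).foldl (fun d p => d.insert p.1 p.2) PySem.Dict.empty with hD
  have hndD : D.keys.Nodup :=
    PySem.Dict.nodup_keys_foldl_insert_key (want.zip number) Prod.fst (fun _ p => p.2)
      PySem.Dict.empty (by rw [PySem.Dict.keys_empty]; exact List.nodup_nil)
  have hsat0 : D.keys.foldl (fun s w => if 0 ≥ D.getD w 0 then s + 1 else s) (0 : Int)
      = satOfD D [] := by
    rw [foldl_count (fun w => 0 ≥ D.getD w 0) D.keys 0, zero_add]
    unfold satOfD winCondB
    have hf : D.keys.filter (fun w => decide ((([] : List String).count w : Int) ≥ D.getD w 0))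
        = D.keys.filter (fun w => decide (0 ≥ D.getD w 0)) :=
      List.filter_congr (fun w _ => by simp)
    rw [hf]
  rw [hsat0, (invB D hndD discount).2.2]
  have hstep : ∀ (acc : Int), ∀ i ∈ PySem.List.pyRange 0 ((discount.length : Int) - 9) 1,
      (fun answer i =>
        let dc_list :=
          PySem.List.sorted
            (PySem.Dict.counter (PySem.List.slice discount (some i) (some (i + 10)))).items
            (fun dl => dl.2) true
        let calc_list := dc_list.foldl
          (fun d dl => if d.contains dl.1 then d.modify dl.1 0 (fun v => v - dl.2) else d) D
        if calc_list.values.all (fun cl => !decide (0 < cl)) then answer + 1 else answer) acc i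
      = (fun answer (i : Int) =>
          if D.keys.all (winCondB D ((discount.drop i.toNat).take 10)) = true then answer + 1
          else answer) acc i := by
    intro acc i hi
    have hib : 0 ≤ i ∧ i < (discount.length : Int) - 9 := by
      simp [PySem.List.pyRange] at hi
      split at hi <;> omega
    obtain ⟨n, rfl⟩ : ∃ n : Nat, i = (n : Int) := ⟨i.toNat, (Int.toNat_of_nonneg hib.1).symm⟩
    dsimp only
    rw [show ((n : Int) + 10) = ((n : Int) + ((10 : Nat) : Int)) from by norm_cast]
    rw [PySem.List.slice_natCast_add, cond_eq D hndD discount n, Int.toNat_natCast]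
    rfl
  rw [PySem.List.foldl_congr_mem _ _ _ _ hstep]
  rw [pyRange_zero_cast]
  rw [List.foldl_map]
  simp only [Int.toNat_natCast]
  refine (foldl_count_bool
    (fun n : Nat => D.keys.all (winCondB D ((discount.drop n).take 10)))
    (List.range ((discount.length : Int) - 9).toNat) 0).trans ?_
  rw [zero_add, show ((discount.length : Int) - 9).toNat = discount.length - 9 from by omega]
  rfl
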